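-- pv_equiv track=rewrite | github.com/toine52000/AuditTool_plateform_testing | analysis/registry_parser.py | formatKey
-- ===== SOURCE A (Python) =====
-- def formatKey(temp_string):
--     string_formated = ""
--     group = temp_string.split("\\")
--
--     if len(group) > 2:
--         for i in range(1,len(group)):
--                 string_formated += "\\" + group[i]
--         return string_formated
--     else:
--        return "\\"
-- ===== SOURCE B (Python) =====
-- def formatKey(temp_string):
--     if temp_string.count("\\") >= 2:
--         return temp_string[temp_string.index("\\"):]
--     return "\\"
-- ===== Notes on version B (the rewrite author's own statement) =====
-- stated objective: simpler
-- what changed: B replaces the split-into-list plus index-loop-rebuild of A by a direct computation on the raw string: count the backslashes once and, when there are at least two, return the suffix starting at the first backslash (one slice); otherwise return a single backslash.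
import Mathlib
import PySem

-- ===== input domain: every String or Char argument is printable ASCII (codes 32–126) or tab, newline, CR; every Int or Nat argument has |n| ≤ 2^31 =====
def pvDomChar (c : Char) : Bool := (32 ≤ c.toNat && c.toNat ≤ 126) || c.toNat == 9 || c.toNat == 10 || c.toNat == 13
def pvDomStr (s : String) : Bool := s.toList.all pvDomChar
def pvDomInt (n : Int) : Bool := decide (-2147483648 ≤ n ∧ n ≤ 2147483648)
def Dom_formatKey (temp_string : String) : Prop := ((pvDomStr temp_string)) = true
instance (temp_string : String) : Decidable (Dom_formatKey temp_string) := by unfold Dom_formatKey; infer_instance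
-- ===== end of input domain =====

-- B drops A's split / intermediate list / rebuilding loop: it counts backslashes and returns one
-- suffix slice of the raw string (objective: simpler); same return value on every input.

-- ===== PORT A =====
def formatKey (temp_string : String) : String :=
  let string_formated : List Char := []
  let group := PySem.Chars.splitOn temp_string.toList "\\".toList
  if 2 < group.length then
    String.ofList ((PySem.List.pyRange 1 (group.length : Int) 1).foldl
      (fun acc i => acc ++ ('\\' :: PySem.List.pyGetD group i [])) string_formated)
  else "\\"

-- ===== PORT B =====
def formatKey_alt (temp_string : String) : String :=
  if 2 ≤ PySem.Str.count temp_string "\\" then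
    PySem.Str.slice temp_string (some (PySem.Str.find temp_string "\\")) none
  else "\\"

-- ===== PRECONDITION & SPEC =====
def Spec_formatKey (temp_string : String) (out : String) : Prop := out = formatKey_alt temp_string
instance (temp_string : String) (out : String) : Decidable (Spec_formatKey temp_string out) := by unfold Spec_formatKey; infer_instance

-- ===== CLAIM (what is proved, stated in full; the proofs are below) =====
def Claim_equal_formatKey : Prop := ∀ (temp_string : String), Dom_formatKey temp_string → Spec_formatKey temp_string (formatKey temp_string)

-- ===== LEMMAS AND PROOFS =====

-- reference splitter on a single separator character
def pvS (c : Char) : List Char → List (List Char)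
  | [] => [[]]
  | x :: xs => if x = c then [] :: pvS c xs else (pvS c xs).modifyHead (x :: ·)

def pvConsHead (a : List Char) : List (List Char) → List (List Char)
  | [] => [a]
  | h :: t => (a ++ h) :: t

theorem pvS_ne_nil (c : Char) (l : List Char) : pvS c l ≠ [] := by
  cases l with
  | nil => simp [pvS]
  | cons x xs =>
    simp only [pvS]
    split
    · simp
    · cases h : pvS c xs with
      | nil => exact absurd h (pvS_ne_nil c xs)
      | cons a b => simp

theorem pvConsHead_nil (c : Char) (l : List Char) : pvConsHead [] (pvS c l) = pvS c l := by
  cases h : pvS c l with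
  | nil => exact absurd h (pvS_ne_nil c l)
  | cons a b => simp [pvConsHead]

theorem pv_go_single (c : Char) (fuel : Nat) (l cur : List Char) (acc : List (List Char))
    (h : l.length < fuel) :
    PySem.Chars.splitOn.go [c] fuel l cur acc = acc.reverse ++ pvConsHead cur.reverse (pvS c l) := by
  induction fuel generalizing l cur acc with
  | zero => omega
  | succ fuel ih =>
    cases l with
    | nil => simp [PySem.Chars.splitOn.go, pvS, pvConsHead]
    | cons x rest =>
      by_cases hx : x = c
      · subst hx
        have hpre : [x].isPrefixOf (x :: rest) = true := by simp [List.isPrefixOf]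
        rw [PySem.Chars.splitOn.go]
        simp only [hpre, if_true, List.length_singleton, List.drop_succ_cons, List.drop_zero]
        rw [ih rest [] (cur.reverse :: acc) (by simp at h ⊢; omega)]
        cases hs : pvS x rest with
        | nil => exact absurd hs (pvS_ne_nil x rest)
        | cons a b => simp [pvS, hs, pvConsHead]
      · have hpre : [c].isPrefixOf (x :: rest) = false := by
          simp [List.isPrefixOf]; exact fun hh => absurd hh.symm hx
        rw [PySem.Chars.splitOn.go]
        simp only [hpre, Bool.false_eq_true, if_false]
        rw [ih rest (x :: cur) acc (by simp at h ⊢; omega)]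
        cases hs : pvS c rest with
        | nil => exact absurd hs (pvS_ne_nil c rest)
        | cons a b => simp [pvS, hx, hs, pvConsHead]

theorem pv_splitOn_eq (c : Char) (l : List Char) :
    PySem.Chars.splitOn l [c] = pvS c l := by
  unfold PySem.Chars.splitOn
  rw [pv_go_single c (l.length + 1) l [] [] (by omega)]
  simp [pvConsHead_nil]

theorem pv_count_go (c : Char) (fuel : Nat) (l : List Char) (acc : Nat)
    (h : l.length ≤ fuel) :
    PySem.Chars.count.go [c] fuel l acc = acc + l.count c := by
  induction fuel generalizing l acc with
  | zero =>
    cases l with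
    | nil => simp [PySem.Chars.count.go]
    | cons x rest => simp at h
  | succ fuel ih =>
    cases l with
    | nil => simp [PySem.Chars.count.go]
    | cons x rest =>
      by_cases hx : x = c
      · subst hx
        have hpre : [x].isPrefixOf (x :: rest) = true := by simp [List.isPrefixOf]
        rw [PySem.Chars.count.go]
        simp only [hpre, if_true, List.length_singleton, List.drop_succ_cons, List.drop_zero]
        rw [ih rest (acc + 1) (by simp at h ⊢; omega)]
        simp
        omega
      · have hpre : [c].isPrefixOf (x :: rest) = false := by
          simp [List.isPrefixOf]; exact fun hh => absurd hh.symm hx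
        rw [PySem.Chars.count.go]
        simp only [hpre, Bool.false_eq_true, if_false]
        rw [ih rest acc (by simp at h ⊢; omega)]
        simp [hx]

theorem pv_count_eq (c : Char) (l : List Char) :
    PySem.Chars.count l [c] = l.count c := by
  unfold PySem.Chars.count
  simp [pv_count_go c l.length l 0 le_rfl]

theorem pv_find_go (c : Char) (l : List Char) (k : Nat) :
    PySem.Chars.find.go [c] l k
      = if c ∈ l then ((k : Int) + ((l.takeWhile (· ≠ c)).length : Int)) else -1 := by
  induction l generalizing k with
  | nil => simp [PySem.Chars.find.go]
  | cons x rest ih =>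
    by_cases hx : x = c
    · subst hx
      have hpre : [x].isPrefixOf (x :: rest) = true := by simp [List.isPrefixOf]
      rw [PySem.Chars.find.go]
      simp [hpre]
    · have hpre : [c].isPrefixOf (x :: rest) = false := by
        simp [List.isPrefixOf]; exact fun hh => absurd hh.symm hx
      rw [PySem.Chars.find.go]
      simp only [hpre, Bool.false_eq_true, if_false]
      rw [ih (k + 1)]
      have hmem : (c ∈ x :: rest) = (c ∈ rest) := by
        simp [List.mem_cons]; intro hh; exact absurd hh.symm hx
      by_cases hm : c ∈ rest
      · simp [hm, hmem, hx]; ring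
      · simp [hm, hmem]
    
theorem pv_find_eq (c : Char) (l : List Char) (h : c ∈ l) :
    PySem.Chars.find l [c] = ((l.takeWhile (· ≠ c)).length : Int) := by
  unfold PySem.Chars.find
  rw [pv_find_go c l 0]
  simp [h]

theorem pvS_length (c : Char) (l : List Char) : (pvS c l).length = l.count c + 1 := by
  induction l with
  | nil => simp [pvS]
  | cons x rest ih =>
    by_cases hx : x = c
    · subst hx; simp [pvS, ih]
    · simp [pvS, hx, ih]

theorem pvS_flatMap (c : Char) (l : List Char) :
    (pvS c l).flatMap (fun g => c :: g) = c :: l := by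
  induction l with
  | nil => simp [pvS]
  | cons x rest ih =>
    by_cases hx : x = c
    · subst hx; simp [pvS, ih]
    · cases hs : pvS c rest with
      | nil => exact absurd hs (pvS_ne_nil c rest)
      | cons a b =>
        rw [hs] at ih
        simp only [List.flatMap_cons] at ih
        simp [pvS, hx, hs, List.flatMap_cons]
        have : a ++ b.flatMap (fun g => c :: g) = rest := by
          have := ih
          simpa using this
        simp [this]

theorem pvS_tail_flatMap (c : Char) (l : List Char) (h : c ∈ l) :
    (pvS c l).tail.flatMap (fun g => c :: g) = l.drop (l.takeWhile (· ≠ c)).length := by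
  induction l with
  | nil => simp at h
  | cons x rest ih =>
    by_cases hx : x = c
    · subst hx
      simp [pvS, pvS_flatMap]
    · have hm : c ∈ rest := by
        rcases List.mem_cons.mp h with h1 | h1
        · exact absurd h1.symm hx
        · exact h1
      cases hs : pvS c rest with
      | nil => exact absurd hs (pvS_ne_nil c rest)
      | cons a b =>
        have ih' := ih hm
        rw [hs] at ih'
        simp only [List.tail_cons] at ih'
        simp only [ne_eq] at ih' ⊢
        simp [pvS, hx, hs, ih']

theorem pv_range_flatMap (c : Char) (gs : List (List Char)) :
    (List.range gs.length).flatMap (fun k => c :: gs.getD k []) = gs.flatMap (fun g => c :: g) := by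
  induction gs with
  | nil => simp
  | cons g rest ih =>
    rw [List.length_cons, List.range_succ_eq_map]
    simp only [List.flatMap_cons, List.flatMap_map, List.getD_cons_zero]
    simp only [Nat.succ_eq_add_one, List.getD_cons_succ]
    rw [ih]

theorem pv_main (temp_string : String) : formatKey temp_string = formatKey_alt temp_string := by
  unfold formatKey formatKey_alt
  have htl : ("\\" : String).toList = ['\\'] := rfl
  rw [htl]
  set cs := temp_string.toList with hcs
  rw [pv_splitOn_eq]
  have hlen := pvS_length '\\' cs
  have hcnt : PySem.Str.count temp_string "\\" = cs.count '\\' := by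
    unfold PySem.Str.count
    rw [htl, pv_count_eq]
  by_cases hg : 2 ≤ cs.count '\\'
  · have hg1 : 2 < (pvS '\\' cs).length := by omega
    rw [if_pos hg1, if_pos (by rw [hcnt]; exact hg)]
    have hmem : '\\' ∈ cs := by
      have : 0 < cs.count '\\' := by omega
      exact List.count_pos_iff.mp this
    -- B side
    have hfind : PySem.Str.find temp_string "\\" = ((cs.takeWhile (· ≠ '\\')).length : Int) := by
      unfold PySem.Str.find
      rw [htl, ← hcs, pv_find_eq '\\' cs hmem]
    rw [hfind]
    unfold PySem.Str.slice
    rw [PySem.Chars.slice_eq_listSlice, ← hcs,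
        PySem.List.slice_from cs (by positivity)]
    -- A side: turn the fold over pyRange into a flatMap over the tail
    set group := pvS '\\' cs with hgroup
    have hn : 3 ≤ group.length := by omega
    rw [PySem.List.pyRange_of_pos 1 (group.length : Int) (by norm_num),
        PySem.List.foldl_append_eq_flatMap]
    have hrange : (if (1 : Int) < (group.length : Int) then
        (((group.length : Int) - 1 + 1 - 1) / 1).toNat else 0) = group.length - 1 := by
      rw [if_pos (by exact_mod_cast (by omega : 1 < group.length))]
      omega
    rw [hrange, List.nil_append, List.flatMap_map]
    obtain ⟨g0, gs, hge⟩ : ∃ g0 gs, group = g0 :: gs := by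
      cases hq : group with
      | nil => rw [hq] at hn; simp at hn
      | cons a b => exact ⟨a, b, rfl⟩
    have hlen2 : group.length - 1 = gs.length := by rw [hge]; simp
    rw [hlen2]
    have hcong : ∀ k ∈ List.range gs.length,
        ('\\' :: PySem.List.pyGetD group (1 + 1 * (k : Int)) []) = '\\' :: gs.getD k [] := by
      intro k _
      have h1 : ((1 : Int) + 1 * (k : Int)) = ((1 + k : Nat) : Int) := by push_cast; ring
      rw [h1, PySem.List.pyGetD_natCast, hge, Nat.add_comm]
      simp [List.getD]
    have hX : (List.range gs.length).flatMap
        (fun (k : Nat) => '\\' :: PySem.List.pyGetD group (1 + 1 * (k : Int)) [])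
        = gs.flatMap (fun g => '\\' :: g) :=
      (List.flatMap_congr hcong).trans (pv_range_flatMap '\\' gs)
    rw [hX]
    have hgs : (pvS '\\' cs).tail = gs := by rw [← hgroup, hge]; rfl
    rw [← hgs, pvS_tail_flatMap '\\' cs hmem]
    congr 1
  · rw [if_neg (by omega), if_neg (by rw [hcnt]; exact hg)]

-- ===== VERDICT (by name: the statement is the Claim_ definition above) =====
theorem formatKey_spec : Claim_equal_formatKey := by
  intro s _
  unfold Spec_formatKey
  exact pv_main s
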